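-- pv_equiv track=rewrite | github.com/kingwangim/leetcode | Python/mice-and-cheese.py | miceAndCheese
-- ===== SOURCE A (Python) =====
-- def miceAndCheese(reward1: list[int], reward2: list[int], k: int) -> int:
--     scores, diff, score = 0, [], 0
--     scores = sum(reward2)
--     for i in range(len(reward1)):
--         diff.append(reward1[i]-reward2[i])
--     diff.sort(reverse=True)
--     for i in range(k):
--         scores += diff[i]
--     return scores
-- ===== SOURCE B (Python) =====
-- def miceAndCheese(reward1: list[int], reward2: list[int], k: int) -> int:
--     # No sorting at all: quickselect-style iterative partitioning sums the k
--     # largest differences directly.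
--     diffs = [a - b for a, b in zip(reward1, reward2)]
--     return sum(reward2) + _sum_top_k(diffs, k)
--
--
-- def _partition(ds, p):
--     g = [x for x in ds if x > p]
--     e = [x for x in ds if x == p]
--     l = [x for x in ds if x < p]
--     return g, e, l
--
--
-- def _sum_top_k(ds, k):
--     acc = 0
--     while True:
--         if k <= 0:
--             return acc
--         if k >= len(ds):
--             return acc + sum(ds)
--         p = ds[0]
--         g, e, l = _partition(ds, p)
--         if k <= len(g):
--             ds = g
--         elif k <= len(g) + len(e):
--             return acc + sum(g) + (k - len(g)) * p
--         else:
--             acc += sum(g) + sum(e)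
--             k -= len(g) + len(e)
--             ds = l
-- ===== Notes on version B (the rewrite author's own statement) =====
-- stated objective: alternative
-- what changed: A sorts the whole difference list descending and sums its first k entries with index loops; B never sorts: it iteratively partitions the differences around a pivot (quickselect-style three-way partition) and accumulates the sum of exactly the k largest.
import Mathlib
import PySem

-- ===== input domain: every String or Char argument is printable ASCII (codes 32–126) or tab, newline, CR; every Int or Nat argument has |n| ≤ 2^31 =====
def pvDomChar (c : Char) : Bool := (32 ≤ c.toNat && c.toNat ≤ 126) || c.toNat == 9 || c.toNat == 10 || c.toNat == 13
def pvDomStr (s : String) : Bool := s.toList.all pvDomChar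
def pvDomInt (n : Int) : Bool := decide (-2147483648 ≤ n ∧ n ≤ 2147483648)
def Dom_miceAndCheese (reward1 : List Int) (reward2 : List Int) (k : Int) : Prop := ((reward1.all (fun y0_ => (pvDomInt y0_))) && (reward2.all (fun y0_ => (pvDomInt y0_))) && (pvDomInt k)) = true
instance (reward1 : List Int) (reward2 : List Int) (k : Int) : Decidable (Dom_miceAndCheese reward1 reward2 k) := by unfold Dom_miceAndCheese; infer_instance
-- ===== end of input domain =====

-- B replaces A's full descending sort + index loops by a sort-free quickselect-style
-- three-way partition loop that accumulates the sum of exactly the k largest differences.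

-- ===== PORT A =====
def miceAndCheese (reward1 : List Int) (reward2 : List Int) (k : Int) : Int :=
  let scores := reward2.sum
  let diff := (PySem.List.pyRange 0 (reward1.length : Int) 1).foldl
      (fun acc i => acc ++ [PySem.List.pyGetD reward1 i 0 - PySem.List.pyGetD reward2 i 0]) []
  let diff := PySem.List.sorted diff (fun x => x) true
  (PySem.List.pyRange 0 k 1).foldl (fun s i => s + PySem.List.pyGetD diff i 0) scores

-- ===== PORT B =====
-- Source B's _partition: the three one-pass comprehensions around the pivot
def pvPartition (ds : List Int) (p : Int) : List Int × List Int × List Int :=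
  (ds.filter (fun x => p < x), ds.filter (fun x => x == p), ds.filter (fun x => x < p))

-- the 'while True' loop of Source B's _sum_top_k, as tail recursion over the same state (ds, k, acc)
def sumTopKAux (ds : List Int) (k : Int) (acc : Int) : Int :=
  if k ≤ 0 then acc
  else if (ds.length : Int) ≤ k then acc + ds.sum
  else
    let p := ds.headD 0
    let t := pvPartition ds p
    let g := t.1
    let e := t.2.1
    let l := t.2.2
    if k ≤ (g.length : Int) then sumTopKAux g k acc
    else if k ≤ (g.length : Int) + (e.length : Int) then acc + g.sum + (k - (g.length : Int)) * p
    else sumTopKAux l (k - (g.length : Int) - (e.length : Int)) (acc + g.sum + e.sum)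
termination_by ds.length
decreasing_by
  all_goals
  · have hlen0 : 0 < ds.length := by omega
    have hp : ds.headD 0 ∈ ds := by
      cases ds with
      | nil => simp at hlen0
      | cons a t => simp
    simp only [pvPartition]
    refine List.length_filter_lt_length_iff_exists.mpr ⟨ds.headD 0, hp, ?_⟩
    simp

def miceAndCheese_alt (reward1 : List Int) (reward2 : List Int) (k : Int) : Int :=
  let diffs := (reward1.zip reward2).map (fun p => p.1 - p.2)
  reward2.sum + sumTopKAux diffs k 0

-- ===== PRECONDITION & SPEC =====
-- Pre_ excludes exactly the inputs on which A RAISES IndexError: reward2[i] with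
-- len(reward1) > len(reward2), or diff[i] with k > len(reward1). A returns on everything else
-- (including negative k, where its final loop is empty) and B matches it there.
def Pre_miceAndCheese (reward1 : List Int) (reward2 : List Int) (k : Int) : Prop :=
  reward1.length ≤ reward2.length ∧ k ≤ reward1.length
instance (reward1 : List Int) (reward2 : List Int) (k : Int) : Decidable (Pre_miceAndCheese reward1 reward2 k) := by
  unfold Pre_miceAndCheese; infer_instance
def pvWitness_miceAndCheese : List Int × List Int × Int := ([4, 1, 3], [2, 2, 5], 2)

def Spec_miceAndCheese (reward1 : List Int) (reward2 : List Int) (k : Int) (out : Int) : Prop := out = miceAndCheese_alt reward1 reward2 k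
instance (reward1 : List Int) (reward2 : List Int) (k : Int) (out : Int) : Decidable (Spec_miceAndCheese reward1 reward2 k out) := by unfold Spec_miceAndCheese; infer_instance

-- ===== CLAIM (what is proved, stated in full; the proofs are below) =====
def Claim_equal_miceAndCheese : Prop := ∀ (reward1 : List Int) (reward2 : List Int) (k : Int), Dom_miceAndCheese reward1 reward2 k → Pre_miceAndCheese reward1 reward2 k → Spec_miceAndCheese reward1 reward2 k (miceAndCheese reward1 reward2 k)

-- ===== LEMMAS AND PROOFS =====

-- A's diff-building index loop equals the zipped difference list (reward2 at least as long).
theorem pv_diff_loop (r1 r2 : List Int) (h : r1.length ≤ r2.length) :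
    (PySem.List.pyRange 0 (r1.length : Int) 1).foldl
      (fun acc i => acc ++ [PySem.List.pyGetD r1 i 0 - PySem.List.pyGetD r2 i 0]) []
    = (r1.zip r2).map (fun p => p.1 - p.2) := by
  rw [PySem.List.foldl_append_singleton_eq_map]
  apply List.ext_getElem
  · simp [PySem.List.length_pyRange_one, h]
  · intro i h1 h2
    simp only [List.nil_append, List.getElem_map, List.getElem_zip]
    have hi : i < r1.length := by
      simpa [PySem.List.length_pyRange_one] using h1
    rw [PySem.List.getElem_pyRange_one]
    have : ((0 : Int) + (i : Int)) = ((i : Nat) : Int) := by omega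
    rw [this, PySem.List.pyGetD_natCast, PySem.List.pyGetD_natCast,
        List.getD_eq_getElem _ _ hi, List.getD_eq_getElem _ _ (by omega : i < r2.length)]

-- A's summing index loop over the first k entries is the sum of 'take k'.
theorem pv_map_pyGetD_take (xs : List Int) (k : Nat) (hk : k ≤ xs.length) :
    (PySem.List.pyRange 0 (k : Int) 1).map (fun j => PySem.List.pyGetD xs j 0) = xs.take k := by
  induction k with
  | zero => simp [PySem.List.pyRange_one_eq_nil]
  | succ n ih =>
    have hn : n ≤ xs.length := by omega
    rw [show ((n + 1 : Nat) : Int) = (n : Int) + 1 by omega,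
        PySem.List.pyRange_one_succ_right (by omega), List.map_append, ih hn]
    simp only [List.map_cons, List.map_nil]
    rw [PySem.List.pyGetD_natCast, List.getD_eq_getElem _ _ (by omega : n < xs.length),
        List.take_add_one, List.getElem?_eq_getElem (by omega : n < xs.length)]
    rfl

-- a list partitions (as a multiset) into the parts greater than, equal to and less than a pivot
theorem pv_perm_partition (p : Int) (ds : List Int) :
    ds.Perm (ds.filter (fun x => p < x) ++ ds.filter (fun x => x == p) ++ ds.filter (fun x => x < p)) := by
  induction ds with
  | nil => simp
  | cons a t ih =>
    rcases lt_trichotomy p a with h | h | h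
    · simp only [List.filter_cons]
      rw [if_pos (by simpa using h), if_neg (by simp [h.ne']), if_neg (by simp [not_lt.mpr h.le])]
      exact ih.cons a
    · subst h
      simp only [List.filter_cons]
      rw [if_neg (by simp), if_pos (by simp), if_neg (by simp)]
      refine (ih.cons p).trans ?_
      have h1 := List.perm_middle (a := p) (l₁ := t.filter (fun x => p < x))
        (l₂ := t.filter (fun x => x == p) ++ t.filter (fun x => x < p))
      simpa [List.append_assoc, List.cons_append] using h1.symm
    · simp only [List.filter_cons]
      rw [if_neg (by simp [not_lt.mpr h.le]), if_neg (by simp [h.ne]), if_pos (by simpa using h)]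
      refine (ih.cons a).trans ?_
      have h1 := List.perm_middle (a := a)
        (l₁ := t.filter (fun x => p < x) ++ t.filter (fun x => x == p))
        (l₂ := t.filter (fun x => x < p))
      simpa [List.append_assoc, List.cons_append] using h1.symm

-- a list of copies of p sums to length * p
theorem pv_sum_const (l : List Int) (p : Int) (h : ∀ x ∈ l, x = p) : l.sum = (l.length : Int) * p := by
  induction l with
  | nil => simp
  | cons a t ih =>
    have ha := h a (List.mem_cons_self)
    have := ih (fun x hx => h x (List.mem_cons_of_mem a hx))
    simp only [List.sum_cons, this, ha, List.length_cons]
    push_cast; ring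

-- the descending sort splits as: sorted part above the pivot, the equal part, sorted part below
theorem pv_sorted_decomp (ds : List Int) (p : Int) :
    PySem.List.sorted ds (fun x => x) true
      = PySem.List.sorted (ds.filter (fun x => p < x)) (fun x => x) true
        ++ ds.filter (fun x => x == p)
        ++ PySem.List.sorted (ds.filter (fun x => x < p)) (fun x => x) true := by
  set g := ds.filter (fun x => p < x) with hg
  set e := ds.filter (fun x => x == p) with he
  set l := ds.filter (fun x => x < p) with hl
  have hmemg : ∀ x ∈ PySem.List.sorted g (fun x => x) true, p < x := by
    intro x hx
    have := (PySem.List.mem_sorted _ _ _ _).1 hx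
    rw [hg, List.mem_filter] at this
    exact of_decide_eq_true this.2
  have hmeme : ∀ x ∈ e, x = p := by
    intro x hx
    rw [he, List.mem_filter] at hx
    exact eq_of_beq hx.2
  have hmeml : ∀ x ∈ PySem.List.sorted l (fun x => x) true, x < p := by
    intro x hx
    have := (PySem.List.mem_sorted _ _ _ _).1 hx
    rw [hl, List.mem_filter] at this
    exact of_decide_eq_true this.2
  refine List.Perm.eq_of_pairwise (le := fun a b : Int => b ≤ a)
    (fun a b _ _ h1 h2 => le_antisymm h2 h1) ?_ ?_ ?_
  · exact PySem.List.sorted_pairwise_rev ds (fun x => x)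
  · refine (List.pairwise_append).2 ⟨(List.pairwise_append).2
      ⟨PySem.List.sorted_pairwise_rev g (fun x => x),
       List.pairwise_of_forall_mem_list (fun a ha b hb => by rw [hmeme a ha, hmeme b hb]),
       fun a ha b hb => le_of_lt (by rw [hmeme b hb]; exact hmemg a ha)⟩,
      PySem.List.sorted_pairwise_rev l (fun x => x), ?_⟩
    intro a ha b hb
    have hb' := hmeml b hb
    rcases List.mem_append.1 ha with ha | ha
    · exact le_of_lt (hb'.trans (hmemg a ha))
    · rw [hmeme a ha]; exact le_of_lt hb'
  · refine ((PySem.List.sorted_perm ds (fun x => x) true).trans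
      (pv_perm_partition p ds)).trans ?_
    exact (((PySem.List.sorted_perm g (fun x => x) true).symm.append
      (List.Perm.refl e)).append (PySem.List.sorted_perm l (fun x => x) true).symm)

-- the partition loop computes acc + (sum of the k largest elements of ds)
theorem pv_sumTopKAux_eq (ds : List Int) (k acc : Int) :
    sumTopKAux ds k acc
      = acc + ((PySem.List.sorted ds (fun x => x) true).take k.toNat).sum := by
  fun_induction sumTopKAux ds k acc with
  | case1 ds k acc hk =>
    have : k.toNat = 0 := by omega
    simp [this]
  | case2 ds k acc hk hlen =>
    have hlen' : (PySem.List.sorted ds (fun x => x) true).length ≤ k.toNat := by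
      rw [PySem.List.length_sorted]; omega
    rw [List.take_of_length_le hlen', (PySem.List.sorted_perm ds (fun x => x) true).sum_eq]
  | case3 ds k acc hk hlen p t g hkg ih =>
    have hgd : g = ds.filter (fun x => p < x) := rfl
    have hpd : p = ds.headD 0 := rfl
    rw [ih, pv_sorted_decomp ds p, hgd]
    rw [List.take_append_of_le_length
          (by rw [List.length_append, PySem.List.length_sorted]; rw [hgd] at hkg; omega),
        List.take_append_of_le_length
          (by rw [PySem.List.length_sorted]; rw [hgd] at hkg; omega)]
  | case4 ds k acc hk hlen p t g e hkg hke =>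
    have hgd : g = ds.filter (fun x => p < x) := rfl
    have hed : e = ds.filter (fun x => x == p) := rfl
    rw [pv_sorted_decomp ds p, ← hgd, ← hed]
    have hlg : (PySem.List.sorted g (fun x => x) true).length = g.length :=
      PySem.List.length_sorted _ _ _
    rw [List.take_append_of_le_length (by rw [List.length_append, hlg]; omega),
        List.take_append,
        List.take_of_length_le (by rw [hlg]; omega), List.sum_append,
        (PySem.List.sorted_perm g (fun x => x) true).sum_eq]
    have hsum : ((e.take (k.toNat - (PySem.List.sorted g (fun x => x) true).length)).sum)
        = ((e.take (k.toNat - (PySem.List.sorted g (fun x => x) true).length)).length : Int) * p := by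
      apply pv_sum_const
      intro x hx
      have hx' := List.mem_of_mem_take hx
      rw [hed, List.mem_filter] at hx'
      exact eq_of_beq hx'.2
    rw [hsum, List.length_take, hlg]
    have : ((min (k.toNat - g.length) e.length : Nat) : Int) = k - (g.length : Int) := by omega
    rw [this]; ring
  | case5 ds k acc hk hlen p t g e l hkg hke ih =>
    have hgd : g = ds.filter (fun x => p < x) := rfl
    have hed : e = ds.filter (fun x => x == p) := rfl
    have hld : l = ds.filter (fun x => x < p) := rfl
    have hlg : (PySem.List.sorted g (fun x => x) true).length = g.length :=
      PySem.List.length_sorted _ _ _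
    rw [ih, pv_sorted_decomp ds p, ← hgd, ← hed, ← hld, List.take_append, List.take_append,
        List.take_of_length_le (l := PySem.List.sorted g (fun x => x) true) (by rw [hlg]; omega),
        List.take_of_length_le (l := e) (by rw [hlg]; omega)]
    simp only [List.sum_append, List.length_append, hlg]
    rw [(PySem.List.sorted_perm g (fun x => x) true).sum_eq,
        show k.toNat - (g.length + e.length) = (k - (g.length : Int) - (e.length : Int)).toNat by omega]
    ring

-- ===== VERDICT (by name: the statement is the Claim_ definition above) =====
theorem miceAndCheese_spec : Claim_equal_miceAndCheese := by
  intro r1 r2 k _ hpre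
  obtain ⟨hlen, hkn⟩ := hpre
  unfold Spec_miceAndCheese miceAndCheese miceAndCheese_alt
  simp only []
  rw [pv_diff_loop r1 r2 hlen]
  set d : List Int := (r1.zip r2).map (fun p => p.1 - p.2) with hd
  set S : List Int := PySem.List.sorted d (fun x => x) true with hS
  have hdlen : d.length = r1.length := by
    rw [hd]; simp [Nat.min_eq_left hlen]
  rw [PySem.List.foldl_add, pv_sumTopKAux_eq, ← hS]
  by_cases hk : 0 ≤ k
  · rw [show k = ((k.toNat : Nat) : Int) by omega,
        pv_map_pyGetD_take S k.toNat (by rw [hS, PySem.List.length_sorted]; omega)]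
    simp only [Int.toNat_natCast]
    omega
  · rw [PySem.List.pyRange_one_eq_nil (by omega), List.map_nil, List.sum_nil,
        show k.toNat = 0 by omega]
    simp
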